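-- pv_equiv track=rewrite | github.com/tb7554/IntersectionManagement | generateL.py | customMaxValue
-- ===== SOURCE A (Python) =====
-- def customMaxValue(priorityArray, itemsForComparison):
--     '''Lets you assign a custom order of priority to the items in array. Returns the highest value.'''
--     index = len(priorityArray)
--     for item in itemsForComparison:
--         try:
--             new_index = priorityArray.index(item)
--             if new_index < index : index = new_index
--         except ValueError:
--             pass
--     return priorityArray[index]
-- ===== SOURCE B (Python) =====
-- def customMaxValue(priorityArray, itemsForComparison):
--     '''Lets you assign a custom order of priority to the items in array. Returns the highest value.'''
--     index = len(priorityArray)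
--     for i, item in enumerate(priorityArray):
--         if item in itemsForComparison:
--             index = i
--             break
--     return priorityArray[index]
-- ===== Notes on version B (the rewrite author's own statement) =====
-- stated objective: alternative
-- what changed: B scans priorityArray once with enumerate and breaks at the first element contained in itemsForComparison, instead of looping over itemsForComparison and minimizing repeated priorityArray.index scans.
import Mathlib
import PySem

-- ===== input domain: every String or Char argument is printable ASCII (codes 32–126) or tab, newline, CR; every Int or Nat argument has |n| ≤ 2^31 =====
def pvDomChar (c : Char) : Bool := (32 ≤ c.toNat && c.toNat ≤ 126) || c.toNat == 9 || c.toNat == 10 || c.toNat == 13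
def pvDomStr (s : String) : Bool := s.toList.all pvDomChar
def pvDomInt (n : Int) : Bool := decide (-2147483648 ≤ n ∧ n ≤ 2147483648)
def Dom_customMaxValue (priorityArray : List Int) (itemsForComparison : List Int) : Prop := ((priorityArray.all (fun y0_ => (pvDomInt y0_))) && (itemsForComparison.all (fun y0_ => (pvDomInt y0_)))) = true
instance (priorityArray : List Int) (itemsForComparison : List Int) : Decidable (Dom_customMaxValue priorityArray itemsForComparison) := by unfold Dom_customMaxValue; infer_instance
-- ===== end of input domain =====

-- B scans priorityArray once and breaks at the first element contained in itemsForComparison,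
-- instead of A's loop over itemsForComparison minimizing repeated priorityArray.index scans.
-- Equivalence is about the return value; both Pythons raise IndexError on the same inputs (excluded by Pre_).

-- ===== PORT A =====
def customMaxValue (priorityArray : List Int) (itemsForComparison : List Int) : Int :=
  -- index = len(priorityArray); for item in itemsForComparison: try index = min(index, priorityArray.index(item)) except ValueError: pass
  let index := itemsForComparison.foldl (fun index item =>
    match PySem.List.index? priorityArray item with
    | some new_index => if new_index < index then new_index else index
    | none => index) priorityArray.length
  -- return priorityArray[index]  (IndexError → none, excluded by Pre_)
  (PySem.List.pyGet? priorityArray (Int.ofNat index)).getD 0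

-- ===== PORT B =====
-- for i, item in enumerate(priorityArray): if item in itemsForComparison: index = i; break
def cmvScan (itemsForComparison : List Int) (len : Nat) : Nat → List Int → Nat
  | _, [] => len
  | i, item :: rest =>
      if itemsForComparison.contains item then i else cmvScan itemsForComparison len (i + 1) rest

def customMaxValue_alt (priorityArray : List Int) (itemsForComparison : List Int) : Int :=
  let index := cmvScan itemsForComparison priorityArray.length 0 priorityArray
  (PySem.List.pyGet? priorityArray (Int.ofNat index)).getD 0

-- ===== PRECONDITION & SPEC =====
-- Pre_ excludes exactly the inputs where A raises IndexError (no element of priorityArray occurs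
-- in itemsForComparison, in particular an empty priorityArray); B raises IndexError there too.
def Pre_customMaxValue (priorityArray : List Int) (itemsForComparison : List Int) : Prop :=
  ∃ x ∈ priorityArray, x ∈ itemsForComparison
instance (priorityArray : List Int) (itemsForComparison : List Int) : Decidable (Pre_customMaxValue priorityArray itemsForComparison) := by unfold Pre_customMaxValue; infer_instance
def pvWitness_customMaxValue : List Int × List Int := ([5, 3, 7], [7, 3])

def Spec_customMaxValue (priorityArray : List Int) (itemsForComparison : List Int) (out : Int) : Prop := out = customMaxValue_alt priorityArray itemsForComparison
instance (priorityArray : List Int) (itemsForComparison : List Int) (out : Int) : Decidable (Spec_customMaxValue priorityArray itemsForComparison out) := by unfold Spec_customMaxValue; infer_instance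

-- ===== CLAIM (what is proved, stated in full; the proofs are below) =====
def Claim_equal_customMaxValue : Prop := ∀ (priorityArray : List Int) (itemsForComparison : List Int), Dom_customMaxValue priorityArray itemsForComparison → Pre_customMaxValue priorityArray itemsForComparison → Spec_customMaxValue priorityArray itemsForComparison (customMaxValue priorityArray itemsForComparison)

-- ===== LEMMAS AND PROOFS =====

-- A's fold result is at most its initial accumulator.
theorem cmvFold_le_init (pa : List Int) (items : List Int) (acc : Nat) :
    items.foldl (fun index item =>
      match PySem.List.index? pa item with
      | some new_index => if new_index < index then new_index else index
      | none => index) acc ≤ acc := by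
  induction items generalizing acc with
  | nil => simp
  | cons item rest ih =>
      simp only [List.foldl_cons]
      cases h : PySem.List.index? pa item with
      | none => exact ih acc
      | some n =>
          by_cases hn : n < acc
          · simp only [hn, if_pos]
            exact le_trans (ih n) (le_of_lt hn)
          · simp only [hn, if_neg, not_false_iff]
            exact ih acc

-- A's fold result is at most the first-occurrence index of any member of items.
theorem cmvFold_le_index (pa : List Int) (items : List Int) :
    ∀ (acc : Nat) (item : Int) (n : Nat), item ∈ items → PySem.List.index? pa item = some n →
    items.foldl (fun index item =>
      match PySem.List.index? pa item with
      | some new_index => if new_index < index then new_index else index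
      | none => index) acc ≤ n := by
  induction items with
  | nil => intro acc item n hmem; cases hmem
  | cons hd rest ih =>
      intro acc item n hmem hn
      simp only [List.foldl_cons]
      rcases List.mem_cons.mp hmem with heq | hrest
      · subst heq
        rw [hn]
        by_cases hlt : n < acc
        · simp only [hlt, if_pos]
          exact cmvFold_le_init pa rest n
        · simp only [hlt, if_neg, not_false_iff]
          exact le_trans (cmvFold_le_init pa rest acc) (Nat.le_of_not_lt hlt)
      · cases h : PySem.List.index? pa hd with
        | none => exact ih _ _ _ hrest hn
        | some m =>
            by_cases hm : m < acc
            · simp only [hm, if_pos]; exact ih _ _ _ hrest hn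
            · simp only [hm, if_neg, not_false_iff]; exact ih _ _ _ hrest hn

-- A's fold result is either the initial accumulator or a first-occurrence index of some member of items.
theorem cmvFold_cases (pa : List Int) (items : List Int) (acc : Nat) :
    (items.foldl (fun index item =>
      match PySem.List.index? pa item with
      | some new_index => if new_index < index then new_index else index
      | none => index) acc = acc) ∨
    (∃ item ∈ items, PySem.List.index? pa item =
      some (items.foldl (fun index item =>
        match PySem.List.index? pa item with
        | some new_index => if new_index < index then new_index else index
        | none => index) acc)) := by
  induction items generalizing acc with
  | nil => left; rfl
  | cons hd rest ih =>
      simp only [List.foldl_cons]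
      cases h : PySem.List.index? pa hd with
      | none =>
          rcases ih acc with heq | ⟨it, hit, hix⟩
          · left; exact heq
          · right; exact ⟨it, List.mem_cons_of_mem _ hit, hix⟩
      | some m =>
          by_cases hm : m < acc
          · simp only [hm, if_pos]
            rcases ih m with heq | ⟨it, hit, hix⟩
            · right; exact ⟨hd, List.mem_cons_self, by rw [heq]; exact h⟩
            · right; exact ⟨it, List.mem_cons_of_mem _ hit, hix⟩
          · simp only [hm, if_neg, not_false_iff]
            rcases ih acc with heq | ⟨it, hit, hix⟩
            · left; exact heq
            · right; exact ⟨it, List.mem_cons_of_mem _ hit, hix⟩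

-- B's scan is findIdx with an offset (returning `len` when nothing matches).
theorem cmvScan_eq_findIdx (items : List Int) (len : Nat) (i : Nat) (l : List Int) :
    cmvScan items len i l =
      if l.findIdx (fun v => items.contains v) < l.length
      then i + l.findIdx (fun v => items.contains v) else len := by
  induction l generalizing i with
  | nil => simp [cmvScan]
  | cons hd rest ih =>
      by_cases h : hd ∈ items
      · simp [cmvScan, h, List.findIdx_cons]
      · have hc : items.contains hd = false := by simpa using h
        simp only [cmvScan, hc, List.findIdx_cons, Bool.cond_eq_ite, Bool.false_eq_true,
          if_false, List.length_cons]
        rw [ih (i + 1)]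
        by_cases hlt : rest.findIdx (fun v => items.contains v) < rest.length
        · rw [if_pos hlt, if_pos (by omega)]
          omega
        · rw [if_neg hlt, if_neg (by omega)]

-- the two index computations agree
theorem cmv_index_eq (pa : List Int) (items : List Int) :
    (items.foldl (fun index item =>
      match PySem.List.index? pa item with
      | some new_index => if new_index < index then new_index else index
      | none => index) pa.length) =
    cmvScan items pa.length 0 pa := by
  rw [cmvScan_eq_findIdx]
  set p : Int → Bool := fun v => items.contains v with hp
  set R := List.foldl (fun index item =>
      match PySem.List.index? pa item with
      | some new_index => if new_index < index then new_index else index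
      | none => index) pa.length items with hR
  have hfind_le : pa.findIdx p ≤ pa.length := List.findIdx_le_length
  have hB : (if pa.findIdx p < pa.length then 0 + pa.findIdx p else pa.length) = pa.findIdx p := by
    by_cases h : pa.findIdx p < pa.length
    · simp [h]
    · rw [if_neg h]; omega
  rw [hB]
  apply Nat.le_antisymm
  · -- fold ≤ findIdx
    by_cases h : pa.findIdx p < pa.length
    · have hpk : p (pa[pa.findIdx p]'h) = true := List.findIdx_getElem
      have hmem_items : pa[pa.findIdx p]'h ∈ items := by
        simpa [hp, List.contains_iff_mem] using hpk
      have hmem_pa : pa[pa.findIdx p]'h ∈ pa := List.getElem_mem h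
      have hsome : (PySem.List.index? pa (pa[pa.findIdx p]'h)).isSome = true :=
        (PySem.List.index?_isSome_iff pa _).mpr hmem_pa
      obtain ⟨k, hk⟩ := Option.isSome_iff_exists.mp hsome
      obtain ⟨hklt, hkeq, hkmin⟩ := PySem.List.getElem_of_index?_eq_some hk
      have hk_le : k ≤ pa.findIdx p := by
        by_contra hgt
        exact hkmin (pa.findIdx p) (Nat.lt_of_not_le hgt) rfl
      exact le_trans (cmvFold_le_index pa items pa.length _ k hmem_items hk) hk_le
    · have : pa.findIdx p = pa.length := Nat.le_antisymm hfind_le (Nat.le_of_not_lt h)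
      rw [this, hR]
      exact cmvFold_le_init pa items pa.length
  · -- findIdx ≤ fold
    rcases cmvFold_cases pa items pa.length with heq | ⟨item, hitem, hix⟩
    · rw [hR, heq]; exact hfind_le
    · rw [← hR] at hix
      obtain ⟨hRlt, hReq, -⟩ := PySem.List.getElem_of_index?_eq_some hix
      by_contra hgt
      have hfalse : p (pa[R]'hRlt) = false := List.not_of_lt_findIdx (Nat.lt_of_not_le hgt)
      rw [hReq] at hfalse
      simp [hp, hitem] at hfalse

-- ===== VERDICT (by name: the statement is the Claim_ definition above) =====
theorem customMaxValue_spec : Claim_equal_customMaxValue := by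
  intro priorityArray itemsForComparison _ _
  unfold Spec_customMaxValue customMaxValue customMaxValue_alt
  rw [cmv_index_eq]
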